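/- GENERATED by mk_final_copies.py from the proof of the farm's unit `vorbis_finish_frame.5` (farm:vorbis_finish_frame.5.1: Proof.lean) as the
   re-elaboration sweep compiled it — do not edit. -/
import Asan.CheckWalk
import Vorbis.Spec.Units.vorbis_finish_frame_5

open X86 X86.User Asan Vorbis Vorbis.Spec

set_option maxRecDepth 4000
set_option maxHeartbeats 4000000

/-- Segment 5 of `vorbis_finish_frame` (`at_107257` … `ret`, 20 instructions, 3 paths, one check site; stb_vorbis_fixed.c 3522–3534:
`if (!prev) return 0; if (len < right) right = len; f->samples_output += right − left; return right − left;`), from the cut-point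
assertion `AtTail` to the function's `Returned`: the check of `f->samples_output` by OB1 (`DecodeInv.objLive`), the invariant over the
store by `vorbis_finish_frame.ff_post_tail`, the result by `vorbis_finish_frame.ff_result_min`. A SEGMENT proof: the walk starts at the state
`s` in the middle of the function; `u` is the state at the function's entry, whose facts the assertion's `frame` carries. -/
theorem Vorbis.Spec.Worked.vorbis_finish_frame_5_ok : Vorbis.Spec.vorbis_finish_frame_5.Statement := by
  intro Lay hLay μ hμ u₀ hcode hload4 others frames len A stored room ysz u ret f s hat
  -- the entry state's facts, from the assertion
  have he := hat.frame.entry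
  have hsh := hat.frame.shadow
  have hr := hat.frame.rdi
  have hfp := hat.frame.fin
  have hinv0 := hat.frame.inv0
  v_entry he
  have hsp := hsh.rsp
  have hwhere := hinv0.objLive.where_ hsh.inv hsh.offText (by simp only [Vorbis.Off.sizeof.stb_vorbis]; omega)
  simp only [Vorbis.Off.sizeof.stb_vorbis] at hwhere
  have hfa : (addr f).toNat = f := toNat_addr f (by omega)
  -- `*f` lies in the arena (the footprint of the contract)
  have har : A.B ≤ f ∧ f + 1808 ≤ A.B + A.L := by
    have hbr := hinv0.arena.block_range (p := f) (n := Off.sizeof.stb_vorbis) hinv0.obj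
    have hl := le_r8 Off.sizeof.stb_vorbis
    have h2 := hinv0.arena.AR2
    simp only [Vorbis.Off.sizeof.stb_vorbis] at hbr hl
    omega
  obtain ⟨j_rip, hfr, j_prev, hinv, hobj⟩ := hat
  obtain ⟨_, _, _, _, _, j_rsp, j_rbx, j_eq, habi, hs0, hs1, hs2, hs3, hs4, hs5, hs6, hlen, hright, hleft, hsame, hun, hacc⟩ := hfr
  have hdf : s.flags .df = false := habi.1
  have hmx : s.mxcsr &&& 0x1F80 = 0x1F80 := habi.2
  have w_rip := j_rip
  have w_eq := j_eq
  obtain ⟨so, rso⟩ : ∃ so, s.mem.readLE (addr f + 1788) 4 = so := ⟨_, rfl⟩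
  obtain ⟨pl, rpl⟩ : ∃ pl, u.mem.readLE (addr f + 1256) 4 = pl := ⟨_, rfl⟩
  rw [rpl] at j_prev
  generalize hln : Word.part .w32 (u.reg .rsi) = ln at *
  generalize hlf : Word.part .w32 (u.reg .rdx) = lf at *
  generalize hrt : Word.part .w32 (u.reg .rcx) = rt at *
  u_walk hcode [hμ.vendor] span [Vorbis.L.textLo, Vorbis.L.textHi] side (v_side)
  · -- check 107271H (path len < right)
    have hun1 : ShadowUntouched s.mem s_107271.mem := by v_untouched
    have hun' : ShadowUntouched u.mem s_107271.mem := Mem.EqOn.trans hun hun1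
    refine hinv0.objLive.accSmall hsh.inv hun' _ 4 (by decide) (by u_omega) ?_
    simp only [Vorbis.Off.sizeof.stb_vorbis]
    u_omega
  · -- check 107271H (path right ≤ len)
    have hun1 : ShadowUntouched s.mem s_107271.mem := by v_untouched
    have hun' : ShadowUntouched u.mem s_107271.mem := Mem.EqOn.trans hun hun1
    refine hinv0.objLive.accSmall hsh.inv hun' _ 4 (by decide) (by u_omega) ?_
    simp only [Vorbis.Off.sizeof.stb_vorbis]
    u_omega
  · -- prev = 0
    refine ReachVia.done ?_
    have hfp' : FinishPre (stb_vorbis.blocksize_1 u.mem f) ln.toInt lf.toInt rt.toInt := by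
      rw [← hln, ← hlf, ← hrt]
      exact hfp
    have hst : Mem.SameExcept [⟨(u.reg .rsp).toNat - 144, (u.reg .rsp).toNat⟩, ⟨f + 1788, f + 1792⟩] s.mem s_10729b.mem := by
      rw [w_mem]
      u_same
    have hun1 : ShadowUntouched s.mem s_10729b.mem := by v_untouched
    have hpost := Vorbis.Spec.vorbis_finish_frame.ff_post_tail hinv hobj hst (by
      intro w hw
      simp only [List.mem_cons, List.mem_nil_iff, or_false] at hw
      rcases hw with rfl | rfl
      · left
        simp only []
        omega
      · right
        simp only []
        omega) hun1
    have hplv : stb_vorbis.previous_length u.mem f = sint32 pl := by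
      simp only [vacc, voff]
      unfold Mem.i32 Mem.u32
      rw [← addr_add_lit, rpl]
    have hpllt : pl < 2 ^ 32 := by
      rw [← rpl]
      exact X86.User.Mem.readLE_lt' _ _ 4
    v_returned
    · show _ ∧ _ ∧ _ ∧ _ ∧ _
      rw [hr, hfa]
      refine ⟨Mem.EqOn.trans hun hun1, hpost.1, hpost.2, ?_, ?_⟩
      · have hz : pl = 0 := by omega
        subst hz
        rw [hplv, w_rax]
        refine ⟨fun _ => ?_, Or.inl ?_⟩ <;> decide
      · rw [w_rax]
        exact Vorbis.Spec.vorbis_finish_frame.ff_ofBV32_lt _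
    · intro r hrr
      cases r <;> first
        | (exact absurd hrr (by decide))
        | (with_reducible assumption)
  · -- prev ≠ 0, len < right
    refine ReachVia.done ?_
    have hfp' : FinishPre (stb_vorbis.blocksize_1 u.mem f) ln.toInt lf.toInt rt.toInt := by
      rw [← hln, ← hlf, ← hrt]
      exact hfp
    have hst : Mem.SameExcept [⟨(u.reg .rsp).toNat - 144, (u.reg .rsp).toNat⟩, ⟨f + 1788, f + 1792⟩] s.mem s_10729b.mem := by
      rw [w_mem]
      u_same
    have hun1 : ShadowUntouched s.mem s_10729b.mem := by v_untouched
    have hpost := Vorbis.Spec.vorbis_finish_frame.ff_post_tail hinv hobj hst (by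
      intro w hw
      simp only [List.mem_cons, List.mem_nil_iff, or_false] at hw
      rcases hw with rfl | rfl
      · left
        simp only []
        omega
      · right
        simp only []
        omega) hun1
    have hplv : stb_vorbis.previous_length u.mem f = sint32 pl := by
      simp only [vacc, voff]
      unfold Mem.i32 Mem.u32
      rw [← addr_add_lit, rpl]
    have hpllt : pl < 2 ^ 32 := by
      rw [← rpl]
      exact X86.User.Mem.readLE_lt' _ _ 4
    v_returned
    · show _ ∧ _ ∧ _ ∧ _ ∧ _
      rw [hr, hfa]
      refine ⟨Mem.EqOn.trans hun hun1, hpost.1, hpost.2, ?_, ?_⟩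
      · have hne : sint32 pl ≠ 0 := fun h0 => hbr_10725c (by rw [Vorbis.Spec.vorbis_finish_frame.ff_sint32_zero hpllt h0])
        rw [hplv, w_rax]
        show Top.FinishResult _ (Word.part .w32 (u.reg .rsi)).toInt (Word.part .w32 (u.reg .rdx)).toInt
          (Word.part .w32 (u.reg .rcx)).toInt (Word.part .w32 _).toInt
        rw [hln, hlf, hrt]
        simp only [X86.Word.part_w32_ofBV32, Vorbis.Spec.vorbis_finish_frame.ff_bv32_ofNat_toNat_mod]
        simp only [Vorbis.Spec.vorbis_finish_frame.ff_ofNat_toNat32] at hbr_107265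
        exact Vorbis.Spec.vorbis_finish_frame.ff_result_min ln lf rt _ hfp' hne (Or.inl ⟨hbr_107265, rfl⟩)
      · rw [w_rax]
        exact Vorbis.Spec.vorbis_finish_frame.ff_ofBV32_lt _
    · intro r hrr
      cases r <;> first
        | (exact absurd hrr (by decide))
        | (with_reducible assumption)
  · -- prev ≠ 0, right ≤ len
    refine ReachVia.done ?_
    have hfp' : FinishPre (stb_vorbis.blocksize_1 u.mem f) ln.toInt lf.toInt rt.toInt := by
      rw [← hln, ← hlf, ← hrt]
      exact hfp
    have hst : Mem.SameExcept [⟨(u.reg .rsp).toNat - 144, (u.reg .rsp).toNat⟩, ⟨f + 1788, f + 1792⟩] s.mem s_10729b.mem := by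
      rw [w_mem]
      u_same
    have hun1 : ShadowUntouched s.mem s_10729b.mem := by v_untouched
    have hpost := Vorbis.Spec.vorbis_finish_frame.ff_post_tail hinv hobj hst (by
      intro w hw
      simp only [List.mem_cons, List.mem_nil_iff, or_false] at hw
      rcases hw with rfl | rfl
      · left
        simp only []
        omega
      · right
        simp only []
        omega) hun1
    have hplv : stb_vorbis.previous_length u.mem f = sint32 pl := by
      simp only [vacc, voff]
      unfold Mem.i32 Mem.u32
      rw [← addr_add_lit, rpl]
    have hpllt : pl < 2 ^ 32 := by
      rw [← rpl]
      exact X86.User.Mem.readLE_lt' _ _ 4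
    v_returned
    · show _ ∧ _ ∧ _ ∧ _ ∧ _
      rw [hr, hfa]
      refine ⟨Mem.EqOn.trans hun hun1, hpost.1, hpost.2, ?_, ?_⟩
      · have hne : sint32 pl ≠ 0 := fun h0 => hbr_10725c (by rw [Vorbis.Spec.vorbis_finish_frame.ff_sint32_zero hpllt h0])
        rw [hplv, w_rax]
        show Top.FinishResult _ (Word.part .w32 (u.reg .rsi)).toInt (Word.part .w32 (u.reg .rdx)).toInt
          (Word.part .w32 (u.reg .rcx)).toInt (Word.part .w32 _).toInt
        rw [hln, hlf, hrt]
        simp only [X86.Word.part_w32_ofBV32, Vorbis.Spec.vorbis_finish_frame.ff_bv32_ofNat_toNat_mod]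
        simp only [Vorbis.Spec.vorbis_finish_frame.ff_ofNat_toNat32] at hbr_107265
        exact Vorbis.Spec.vorbis_finish_frame.ff_result_min ln lf rt _ hfp' hne (Or.inr ⟨hbr_107265, rfl⟩)
      · rw [w_rax]
        exact Vorbis.Spec.vorbis_finish_frame.ff_ofBV32_lt _
    · intro r hrr
      cases r <;> first
        | (exact absurd hrr (by decide))
        | (with_reducible assumption)
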